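-- pv_equiv track=rewrite | github.com/morefreeze/morefreeze.github.io | _code/codefree.py | is_valid_commafree
-- ===== SOURCE A (Python) =====
-- def get_cyclic_shifts(word):
--     """Get all cyclic shifts of a word"""
--     n = len(word)
--     shifts = []
--     for i in range(n):
--         shifts.append(word[i:] + word[:i])
--     return shifts
--
-- def is_periodic(word):
--     """Check if a word is periodic"""
--     n = len(word)
--     for i in range(1, n):
--         if n % i == 0:
--             period = word[:i]
--             if period * (n//i) == word:
--                 return True
--     return False
--
-- def is_valid_commafree(word, existing_codes):
--     """Check if adding word would maintain comma-free property"""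
--     n = len(word)
--
--     # Check if word is periodic
--     if is_periodic(word):
--         return False
--
--     # Check if word is a cyclic shift of any existing code
--     shifts = get_cyclic_shifts(word)
--     for code in existing_codes:
--         if code in shifts:
--             return False
--
--     # Check concatenations with existing codes
--     for code in existing_codes:
--         # Check concatenations in both orders
--         concat1 = code + word
--         concat2 = word + code
--
--         # Check all n-length substrings
--         for i in range(1, n):
--             substring1 = concat1[i:i+n]
--             substring2 = concat2[i:i+n]
--
--             # Check if any substring is a cyclic shift of any existing code
--             for existing in existing_codes:
--                 if substring1 in existing or substring2 in existing:
--                     return False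
--
--     return True
-- ===== SOURCE B (Python) =====
-- def is_periodic(word):
--     """Check if a word is periodic"""
--     n = len(word)
--     for i in range(1, n):
--         if n % i == 0:
--             period = word[:i]
--             if period * (n//i) == word:
--                 return True
--     return False
--
-- def is_valid_commafree(word, existing_codes):
--     """Check if adding word would maintain comma-free property"""
--     n = len(word)
--
--     if is_periodic(word):
--         return False
--
--     # code is a cyclic shift of word  iff  len(code) == n and code occurs in word+word
--     if n:
--         doubled = word + word
--         for code in existing_codes:
--             if len(code) == n and code in doubled:
--                 return False
--
--     # index every substring (length 1..n) of every existing code once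
--     subs = set()
--     for existing in existing_codes:
--         m = len(existing)
--         for a in range(m):
--             for b in range(a + 1, min(a + n, m) + 1):
--                 subs.add(existing[a:b])
--
--     # each query substring is answered by one set lookup
--     for code in existing_codes:
--         concat1 = code + word
--         concat2 = word + code
--         for i in range(1, n):
--             if concat1[i:i+n] in subs or concat2[i:i+n] in subs:
--                 return False
--
--     return True
-- ===== Notes on version B (the rewrite author's own statement) =====
-- stated objective: faster
-- what changed: B replaces A's per-substring rescan of all existing codes with a precomputed set of all length-<=n substrings of the existing codes (one hash lookup per query), and replaces the cyclic-shift list scan with a single substring test on word+word.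
import Mathlib
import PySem

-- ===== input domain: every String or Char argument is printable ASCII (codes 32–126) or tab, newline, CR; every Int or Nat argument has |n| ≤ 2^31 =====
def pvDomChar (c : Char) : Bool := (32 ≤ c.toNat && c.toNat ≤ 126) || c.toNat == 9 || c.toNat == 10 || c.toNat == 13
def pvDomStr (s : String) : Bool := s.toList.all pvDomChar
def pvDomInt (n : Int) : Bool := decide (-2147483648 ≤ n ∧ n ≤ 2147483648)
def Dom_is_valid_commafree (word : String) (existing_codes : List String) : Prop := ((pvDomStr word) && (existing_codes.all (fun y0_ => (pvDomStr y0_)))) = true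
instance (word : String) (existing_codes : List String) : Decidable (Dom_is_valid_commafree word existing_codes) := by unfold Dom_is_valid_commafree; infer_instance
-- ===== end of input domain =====

-- B replaces A's rescans of all existing codes: rotation test = one substring query on word+word,
-- and the cubic "substring of some existing code" inner scans become one precomputed substring set.

-- ===== PORT A =====
-- Python 'period * k' on strings: k concatenated copies (k ≤ 0 gives '')
def pyStrMul (cs : List Char) (k : Int) : List Char :=
  (List.range k.toNat).foldl (fun acc _ => acc ++ cs) []

-- helper is_periodic (textually identical in A and in B: both ports call it)
def isPeriodic (w : List Char) : Bool :=
  (PySem.List.pyRange 1 (w.length : Int) 1).any (fun i =>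
    PySem.Int.mod (w.length : Int) i == 0 &&
      pyStrMul (PySem.List.slice w none (some i)) (PySem.Int.floordiv (w.length : Int) i) == w)

-- helper get_cyclic_shifts (A only)
def getCyclicShifts (w : List Char) : List (List Char) :=
  (PySem.List.pyRange 0 (w.length : Int) 1).foldl
    (fun shifts i =>
      shifts ++ [PySem.List.slice w (some i) none ++ PySem.List.slice w none (some i)]) []

def is_valid_commafree (word : String) (existing_codes : List String) : Bool :=
  let w := word.toList
  let codes := existing_codes.map String.toList
  let n : Int := (w.length : Int)
  if isPeriodic w then false
  else
    let shifts := getCyclicShifts w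
    if codes.any (fun code => shifts.contains code) then false
    else if codes.any (fun code =>
        let concat1 := code ++ w
        let concat2 := w ++ code
        (PySem.List.pyRange 1 n 1).any (fun i =>
          let substring1 := PySem.List.slice concat1 (some i) (some (i + n))
          let substring2 := PySem.List.slice concat2 (some i) (some (i + n))
          codes.any (fun existing =>
            PySem.Chars.isIn substring1 existing || PySem.Chars.isIn substring2 existing)))
      then false
    else true

-- ===== PORT B =====
def is_valid_commafree_alt (word : String) (existing_codes : List String) : Bool :=
  let w := word.toList
  let codes := existing_codes.map String.toList
  let n : Int := (w.length : Int)
  if isPeriodic w then false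
  else
    let doubled := w ++ w
    if n != 0 && codes.any (fun code =>
        (code.length : Int) == n && PySem.Chars.isIn code doubled) then false
    else
      let subs : PySem.Set (List Char) :=
        codes.foldl (fun s existing =>
          (PySem.List.pyRange 0 (existing.length : Int) 1).foldl (fun s a =>
            (PySem.List.pyRange (a + 1) (min (a + n) (existing.length : Int) + 1) 1).foldl
              (fun s b => PySem.Set.add s (PySem.List.slice existing (some a) (some b))) s) s)
          PySem.Set.empty
      if codes.any (fun code =>
          (PySem.List.pyRange 1 n 1).any (fun i =>
            PySem.Set.contains subs (PySem.List.slice (code ++ w) (some i) (some (i + n))) ||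
            PySem.Set.contains subs (PySem.List.slice (w ++ code) (some i) (some (i + n)))))
        then false
      else true

-- ===== PRECONDITION & SPEC =====
def Spec_is_valid_commafree (word : String) (existing_codes : List String) (out : Bool) : Prop := out = is_valid_commafree_alt word existing_codes
instance (word : String) (existing_codes : List String) (out : Bool) : Decidable (Spec_is_valid_commafree word existing_codes out) := by unfold Spec_is_valid_commafree; infer_instance

-- ===== CLAIM (what is proved, stated in full; the proofs are below) =====
def Claim_equal_is_valid_commafree : Prop := ∀ (word : String) (existing_codes : List String), Dom_is_valid_commafree word existing_codes → Spec_is_valid_commafree word existing_codes (is_valid_commafree word existing_codes)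

-- ===== LEMMAS AND PROOFS =====

-- A's shifts list, written as a map (proof-side form of getCyclicShifts)
def shiftsOf (w : List Char) : List (List Char) :=
  (List.range w.length).map (fun k => w.drop k ++ w.take k)

theorem getCyclicShifts_eq (w : List Char) : getCyclicShifts w = shiftsOf w := by
  unfold getCyclicShifts shiftsOf
  rw [PySem.List.foldl_append_singleton_eq_map, PySem.List.pyRange_one]
  simp [PySem.List.slice_from_natCast, PySem.List.slice_to_natCast]

-- a rotation of w is an |w|-length infix of w ++ w, and conversely (w ≠ [])
theorem mem_shiftsOf_iff (w c : List Char) (hw : w ≠ []) :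
    c ∈ shiftsOf w ↔ (c.length = w.length ∧ c <:+: (w ++ w)) := by
  have hw' : 0 < w.length := List.length_pos_of_ne_nil hw
  unfold shiftsOf
  simp only [List.mem_map, List.mem_range]
  constructor
  · rintro ⟨k, hk, rfl⟩
    refine ⟨by simp [List.length_take]; omega, w.take k, w.drop k, ?_⟩
    conv_rhs => rw [← List.take_append_drop k w]
    simp only [List.append_assoc]
  · rintro ⟨hlen, s, u, heq⟩
    have hlens := congrArg List.length heq
    simp only [List.length_append] at hlens
    have hs : s.length ≤ w.length := by omega
    have hc : c = w.drop s.length ++ w.take s.length := by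
      have h1 : (w ++ w).drop s.length = c ++ u := by
        rw [← heq, List.append_assoc, List.drop_left]
      have h2 : c = ((w ++ w).drop s.length).take c.length := by
        rw [h1, List.take_append, List.take_of_length_le (le_refl _), Nat.sub_self,
          List.take_zero, List.append_nil]
      rw [h2, List.drop_append_of_le_length hs, List.take_append, hlen,
        List.take_of_length_le (by simp), List.length_drop,
        show w.length - (w.length - s.length) = s.length by omega]
    rcases Nat.lt_or_ge s.length w.length with hlt | hge
    · exact ⟨s.length, hlt, hc.symm⟩
    · refine ⟨0, hw', ?_⟩
      have : s.length = w.length := le_antisymm hs hge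
      simp only [this, List.drop_length, List.take_length, List.nil_append] at hc
      simpa using hc.symm

-- membership in a foldl whose step satisfies a pointwise characterisation
theorem mem_foldl_of_step {α β : Type} (l : List β) (step : List α → β → List α)
    (P : β → α → Prop) (hstep : ∀ s b t, t ∈ step s b ↔ t ∈ s ∨ P b t) :
    ∀ s t, t ∈ l.foldl step s ↔ t ∈ s ∨ ∃ b ∈ l, P b t := by
  induction l with
  | nil => simp
  | cons x xs ih =>
    intro s t
    rw [List.foldl_cons, ih, hstep]
    simp only [List.mem_cons]
    constructor
    · rintro ((h | h) | h)
      · exact Or.inl h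
      · exact Or.inr ⟨x, Or.inl rfl, h⟩
      · obtain ⟨b, hb, hP⟩ := h; exact Or.inr ⟨b, Or.inr hb, hP⟩
    · rintro (h | ⟨b, (rfl | hb), hP⟩)
      · exact Or.inl (Or.inl h)
      · exact Or.inl (Or.inr hP)
      · exact Or.inr ⟨b, hb, hP⟩

-- membership in B's substring index
theorem mem_subs (cs : List (List Char)) (nI : Int) (t : List Char) :
    t ∈ (cs.foldl (fun s existing =>
          (PySem.List.pyRange 0 (existing.length : Int) 1).foldl (fun s a =>
            (PySem.List.pyRange (a + 1) (min (a + nI) (existing.length : Int) + 1) 1).foldl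
              (fun s b => PySem.Set.add s (PySem.List.slice existing (some a) (some b))) s) s)
        PySem.Set.empty) ↔
      ∃ e ∈ cs, ∃ a b : Int, a ∈ PySem.List.pyRange 0 (e.length : Int) 1 ∧
        b ∈ PySem.List.pyRange (a + 1) (min (a + nI) (e.length : Int) + 1) 1 ∧
        t = PySem.List.slice e (some a) (some b) := by
  rw [mem_foldl_of_step _ _
    (fun e t => ∃ a b : Int, a ∈ PySem.List.pyRange 0 (e.length : Int) 1 ∧
        b ∈ PySem.List.pyRange (a + 1) (min (a + nI) (e.length : Int) + 1) 1 ∧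
        t = PySem.List.slice e (some a) (some b)) ?_ PySem.Set.empty t]
  · simp [PySem.Set.empty]
  · intro s e t
    rw [mem_foldl_of_step _ _
      (fun a t => ∃ b : Int,
          b ∈ PySem.List.pyRange (a + 1) (min (a + nI) (e.length : Int) + 1) 1 ∧
          t = PySem.List.slice e (some a) (some b)) ?_ s t]
    · constructor
      · rintro (h | ⟨a, ha, b, hb, rfl⟩)
        · exact Or.inl h
        · exact Or.inr ⟨a, b, ha, hb, rfl⟩
      · rintro (h | ⟨a, b, ha, hb, rfl⟩)
        · exact Or.inl h
        · exact Or.inr ⟨a, ha, b, hb, rfl⟩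
    · intro s a t
      rw [PySem.Set.mem_foldl_add]

-- a nonnegative-bounds slice is an infix
theorem slice_isInfix (e : List Char) (a b : Int) (ha : 0 ≤ a) (hb : 0 ≤ b) :
    PySem.List.slice e (some a) (some b) <:+: e := by
  rw [PySem.List.slice_toNat e ha hb]
  exact ((e.drop a.toNat).take_prefix _).isInfix.trans (e.drop_suffix a.toNat).isInfix

-- B's index holds exactly the nonempty infixes of length ≤ nI of some existing code
theorem subs_iff_infix (cs : List (List Char)) (nI : Int) (t : List Char)
    (h1 : t ≠ []) (h2 : (t.length : Int) ≤ nI) :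
    (∃ e ∈ cs, ∃ a b : Int, a ∈ PySem.List.pyRange 0 (e.length : Int) 1 ∧
        b ∈ PySem.List.pyRange (a + 1) (min (a + nI) (e.length : Int) + 1) 1 ∧
        t = PySem.List.slice e (some a) (some b)) ↔
      ∃ e ∈ cs, t <:+: e := by
  constructor
  · rintro ⟨e, he, a, b, ha, hb, rfl⟩
    rw [PySem.List.mem_pyRange_one] at ha hb
    exact ⟨e, he, slice_isInfix e a b ha.1 (by omega)⟩
  · rintro ⟨e, he, s, u, rfl⟩
    have ht : 0 < t.length := List.length_pos_of_ne_nil h1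
    refine ⟨s ++ t ++ u, he, (s.length : Int), ((s.length + t.length : Nat) : Int), ?_, ?_, ?_⟩
    · rw [PySem.List.mem_pyRange_one]
      simp only [List.length_append]
      push_cast
      omega
    · rw [PySem.List.mem_pyRange_one]
      simp only [List.length_append]
      push_cast
      omega
    · rw [show ((s.length : Nat) : Int) = ((s.length : Nat) : Int) from rfl,
        PySem.List.slice_natCast, List.append_assoc, List.drop_left,
        Nat.add_sub_cancel_left, List.take_left]

-- lengths of the loop's query substrings
theorem slice_query_len (L w : List Char) (hL : w.length ≤ L.length) (i : Int)
    (hi : i ∈ PySem.List.pyRange 1 (w.length : Int) 1) :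
    PySem.List.slice L (some i) (some (i + (w.length : Int))) ≠ [] ∧
      ((PySem.List.slice L (some i) (some (i + (w.length : Int)))).length : Int)
        ≤ (w.length : Int) := by
  rw [PySem.List.mem_pyRange_one] at hi
  obtain ⟨j, rfl⟩ : ∃ j : Nat, i = (j : Int) := ⟨i.toNat, by omega⟩
  have hj : 1 ≤ j ∧ j < w.length := by omega
  rw [PySem.List.slice_natCast_add]
  constructor
  · apply List.ne_nil_of_length_pos
    simp only [List.length_take, List.length_drop]
    omega
  · simp only [List.length_take, List.length_drop]
    push_cast
    omega

-- rotation checks agree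
theorem eqRot (w : List Char) (cs : List (List Char)) :
    cs.any (fun code => (getCyclicShifts w).contains code) =
      (((w.length : Int) != 0) && cs.any (fun code =>
        ((code.length : Int) == (w.length : Int)) && PySem.Chars.isIn code (w ++ w))) := by
  rw [getCyclicShifts_eq]
  rcases eq_or_ne w [] with rfl | hw
  · simp [shiftsOf]
  · have hn : ((w.length : Int) != 0) = true := by
      simp only [bne_iff_ne, ne_eq, Nat.cast_eq_zero, List.length_eq_zero_iff]
      exact hw
    rw [hn, Bool.true_and, Bool.eq_iff_iff]
    simp only [List.any_eq_true]
    constructor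
    · rintro ⟨code, hc, hmem⟩
      have hmem' : code ∈ shiftsOf w := by simpa using hmem
      obtain ⟨h1, h2⟩ := (mem_shiftsOf_iff w code hw).mp hmem'
      refine ⟨code, hc, ?_⟩
      simp only [Bool.and_eq_true, beq_iff_eq, Nat.cast_inj]
      exact ⟨h1, by simpa [PySem.Chars.isIn_iff_infix] using h2⟩
    · rintro ⟨code, hc, h⟩
      simp only [Bool.and_eq_true, beq_iff_eq, Nat.cast_inj,
        PySem.Chars.isIn_iff_infix] at h
      refine ⟨code, hc, ?_⟩
      have : code ∈ shiftsOf w := (mem_shiftsOf_iff w code hw).mpr h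
      simpa using this

-- Bool.any respects pointwise equality on members
theorem any_congr_mem {α : Type} (l : List α) (f g : α → Bool)
    (h : ∀ a ∈ l, f a = g a) : l.any f = l.any g := by
  induction l with
  | nil => rfl
  | cons x xs ih => simp_all

-- one (code, i) query: scanning all codes = two lookups in the index
theorem inner_eq (cs : List (List Char)) (w code : List Char) (i : Int)
    (hi : i ∈ PySem.List.pyRange 1 (w.length : Int) 1) :
    (cs.any (fun existing =>
        PySem.Chars.isIn (PySem.List.slice (code ++ w) (some i) (some (i + (w.length : Int)))) existing ||
        PySem.Chars.isIn (PySem.List.slice (w ++ code) (some i) (some (i + (w.length : Int)))) existing)) =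
      (PySem.Set.contains (cs.foldl (fun s existing =>
          (PySem.List.pyRange 0 (existing.length : Int) 1).foldl (fun s a =>
            (PySem.List.pyRange (a + 1) (min (a + (w.length : Int)) (existing.length : Int) + 1) 1).foldl
              (fun s b => PySem.Set.add s (PySem.List.slice existing (some a) (some b))) s) s)
        PySem.Set.empty)
        (PySem.List.slice (code ++ w) (some i) (some (i + (w.length : Int)))) ||
      PySem.Set.contains (cs.foldl (fun s existing =>
          (PySem.List.pyRange 0 (existing.length : Int) 1).foldl (fun s a =>
            (PySem.List.pyRange (a + 1) (min (a + (w.length : Int)) (existing.length : Int) + 1) 1).foldl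
              (fun s b => PySem.Set.add s (PySem.List.slice existing (some a) (some b))) s) s)
        PySem.Set.empty)
        (PySem.List.slice (w ++ code) (some i) (some (i + (w.length : Int))))) := by
  obtain ⟨h1ne, h1le⟩ := slice_query_len (code ++ w) w (by simp) i hi
  obtain ⟨h2ne, h2le⟩ := slice_query_len (w ++ code) w (by simp) i hi
  rw [Bool.eq_iff_iff]
  simp only [List.any_eq_true, Bool.or_eq_true, PySem.Chars.isIn_iff_infix,
    PySem.Set.contains_iff, mem_subs,
    subs_iff_infix _ _ _ h1ne h1le, subs_iff_infix _ _ _ h2ne h2le]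
  constructor
  · rintro ⟨e, he, h | h⟩
    exacts [Or.inl ⟨e, he, h⟩, Or.inr ⟨e, he, h⟩]
  · rintro (⟨e, he, h⟩ | ⟨e, he, h⟩)
    exacts [⟨e, he, Or.inl h⟩, ⟨e, he, Or.inr h⟩]

-- concatenation checks agree
theorem eqLoop (w : List Char) (cs : List (List Char)) :
    (cs.any (fun code =>
        (PySem.List.pyRange 1 (w.length : Int) 1).any (fun i =>
          cs.any (fun existing =>
            PySem.Chars.isIn (PySem.List.slice (code ++ w) (some i) (some (i + (w.length : Int)))) existing ||
            PySem.Chars.isIn (PySem.List.slice (w ++ code) (some i) (some (i + (w.length : Int)))) existing)))) =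
      (cs.any (fun code =>
        (PySem.List.pyRange 1 (w.length : Int) 1).any (fun i =>
          PySem.Set.contains (cs.foldl (fun s existing =>
              (PySem.List.pyRange 0 (existing.length : Int) 1).foldl (fun s a =>
                (PySem.List.pyRange (a + 1) (min (a + (w.length : Int)) (existing.length : Int) + 1) 1).foldl
                  (fun s b => PySem.Set.add s (PySem.List.slice existing (some a) (some b))) s) s)
            PySem.Set.empty)
            (PySem.List.slice (code ++ w) (some i) (some (i + (w.length : Int)))) ||
          PySem.Set.contains (cs.foldl (fun s existing =>
              (PySem.List.pyRange 0 (existing.length : Int) 1).foldl (fun s a =>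
                (PySem.List.pyRange (a + 1) (min (a + (w.length : Int)) (existing.length : Int) + 1) 1).foldl
                  (fun s b => PySem.Set.add s (PySem.List.slice existing (some a) (some b))) s) s)
            PySem.Set.empty)
            (PySem.List.slice (w ++ code) (some i) (some (i + (w.length : Int))))))) := by
  apply any_congr_mem
  intro code hc
  apply any_congr_mem
  intro i hi
  exact inner_eq cs w code i hi

-- ===== VERDICT (by name: the statement is the Claim_ definition above) =====
theorem is_valid_commafree_spec : Claim_equal_is_valid_commafree := by
  intro word codes _
  unfold Spec_is_valid_commafree
  simp only [is_valid_commafree, is_valid_commafree_alt]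
  by_cases hp : isPeriodic word.toList
  · simp [hp]
  · simp only [hp]
    rw [eqRot, eqLoop]
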